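-- pv_equiv track=rewrite | github.com/theguyoverthere/CMU15-112-Spring17 | src/Week3/Practice/wk3_practice.py | minNonZeroDigit
-- ===== SOURCE A (Python) =====
-- def minNonZeroDigit(n):
--     smallestNonZeroDigit = 9
--
--     while n > 0:
--         nthDigit = n % 10
--
--         if (nthDigit != 0) and (nthDigit < smallestNonZeroDigit):
--             smallestNonZeroDigit = nthDigit
--
--         n //= 10
--
--     return smallestNonZeroDigit
-- ===== SOURCE B (Python) =====
-- def minNonZeroDigit(n):
--     if n <= 0:
--         return 9
--     return min((int(c) for c in str(n) if c != '0'), default=9)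
-- ===== Notes on version B (the rewrite author's own statement) =====
-- stated objective: simpler
-- what changed: Replaces the running-min while-loop with arithmetic digit extraction by a one-liner taking min over the nonzero digit characters of str(n) with default=9 (and an explicit guard returning 9 for n <= 0, where A's loop never runs).
import Mathlib
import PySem

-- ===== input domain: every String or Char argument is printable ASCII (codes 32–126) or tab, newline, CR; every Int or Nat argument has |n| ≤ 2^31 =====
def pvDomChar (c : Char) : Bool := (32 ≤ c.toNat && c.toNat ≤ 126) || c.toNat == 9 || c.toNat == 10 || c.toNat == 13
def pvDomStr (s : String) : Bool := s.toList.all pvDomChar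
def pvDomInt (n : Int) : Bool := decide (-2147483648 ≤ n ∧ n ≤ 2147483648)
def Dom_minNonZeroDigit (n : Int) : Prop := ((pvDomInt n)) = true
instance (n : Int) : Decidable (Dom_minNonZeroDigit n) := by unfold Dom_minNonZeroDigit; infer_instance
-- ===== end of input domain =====

-- B replaces A's running-min while-loop over arithmetic digit extraction by a one-pass
-- min over the nonzero digit characters of str(n) (objective: simpler).

-- ===== PORT A =====
-- the while-loop of A, as structural recursion on the loop variable n
def minNonZeroDigitLoop (n acc : Int) : Int :=
  if n > 0 then
    let nthDigit := PySem.Int.mod n 10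
    let acc' := if nthDigit ≠ 0 ∧ nthDigit < acc then nthDigit else acc
    minNonZeroDigitLoop (PySem.Int.floordiv n 10) acc'
  else acc
termination_by n.toNat
decreasing_by
  simp only [PySem.Int.floordiv]
  rw [Int.fdiv_eq_ediv]
  omega

def minNonZeroDigit (n : Int) : Int := minNonZeroDigitLoop n 9

-- ===== PORT B =====
-- int(c) for a single decimal-digit character c is ported as its code point minus 48;
-- this is exact since str(n) for n > 0 consists only of the characters '0'-'9'.
def minNonZeroDigit_alt (n : Int) : Int :=
  if n ≤ 0 then 9
  else
    match PySem.List.min?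
        ((PySem.Int.toStr n).toList.filterMap
          (fun c => if c ≠ '0' then some ((c.toNat : Int) - 48) else none)) id with
    | some m => m
    | none => 9

-- ===== PRECONDITION & SPEC =====
def Spec_minNonZeroDigit (n : Int) (out : Int) : Prop := out = minNonZeroDigit_alt n
instance (n : Int) (out : Int) : Decidable (Spec_minNonZeroDigit n out) := by unfold Spec_minNonZeroDigit; infer_instance

-- ===== CLAIM (what is proved, stated in full; the proofs are below) =====
def Claim_equal_minNonZeroDigit : Prop := ∀ (n : Int), Dom_minNonZeroDigit n → Spec_minNonZeroDigit n (minNonZeroDigit n)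

-- ===== LEMMAS AND PROOFS =====

-- A's loop-body update on the accumulator, at the level of Nat digits
def pvUpd (acc : Int) (d : Nat) : Int :=
  if (d : Int) ≠ 0 ∧ (d : Int) < acc then (d : Int) else acc

-- the digit → Option Int map performed by B's filter/int conversion, at the level of Nat digits
def pvDig (d : Nat) : Option Int := if d = 0 then none else some (d : Int)

lemma loop_eq_foldl_digits (m : Nat) (acc : Int) :
    minNonZeroDigitLoop (m : Int) acc = (Nat.digits 10 m).foldl pvUpd acc := by
  induction m using Nat.strong_induction_on generalizing acc with
  | _ m ih =>
    rcases Nat.eq_zero_or_pos m with hm | hm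
    · subst hm; rw [minNonZeroDigitLoop]; simp
    · rw [minNonZeroDigitLoop]
      have hpos : (m : Int) > 0 := by exact_mod_cast hm
      rw [if_pos hpos]
      have hmod : PySem.Int.mod (m : Int) 10 = ((m % 10 : Nat) : Int) := by
        simp only [PySem.Int.mod]; rw [Int.fmod_eq_emod]; simp
      have hdiv : PySem.Int.floordiv (m : Int) 10 = ((m / 10 : Nat) : Int) := by
        simp only [PySem.Int.floordiv]; rw [Int.fdiv_eq_ediv]; simp
      rw [Nat.digits_def' (by norm_num) hm, List.foldl_cons]
      simp only [hmod, hdiv]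
      have hupd : (if ((m % 10 : Nat) : Int) ≠ 0 ∧ ((m % 10 : Nat) : Int) < acc
          then ((m % 10 : Nat) : Int) else acc) = pvUpd acc (m % 10) := rfl
      rw [hupd]
      exact ih (m / 10) (Nat.div_lt_self hm (by norm_num)) _

lemma toDigitsCore_eq (f : Nat) :
    ∀ (m : Nat) (acc : List Char), 0 < m → m < f →
      Nat.toDigitsCore 10 f m acc = ((Nat.digits 10 m).map Nat.digitChar).reverse ++ acc := by
  induction f with
  | zero => intro m acc h hf; omega
  | succ f ih =>
    intro m acc hm hf
    rw [Nat.toDigitsCore]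
    rcases Nat.eq_zero_or_pos (m / 10) with h10 | h10
    · simp only [h10, if_true]
      rw [Nat.digits_def' (by norm_num) hm, h10]
      simp
    · simp only [Nat.pos_iff_ne_zero.mp h10, if_false]
      rw [ih (m / 10) _ h10 (by omega)]
      rw [Nat.digits_def' (by norm_num) hm]
      simp

-- the folding step inside PySem.List.min? with key `id`, named for the proofs
def pvStep (acc : Option Int) (x : Int) : Option Int :=
  match acc with
  | none => some x
  | some m => if x < m then some x else some m

lemma min?_eq_foldl_pvStep (l : List Int) :
    PySem.List.min? l id = l.foldl pvStep none := by
  simp only [PySem.List.min?]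
  congr 1
  funext acc x
  cases acc <;> rfl

-- evaluating min?'s fold: the running optional minimum is the fold of `min`
lemma min?_foldl (xs : List Int) (a : Int) :
    xs.foldl pvStep (some a) = some (xs.foldl min a) := by
  induction xs generalizing a with
  | nil => rfl
  | cons x xs ih =>
    rw [List.foldl_cons, List.foldl_cons]
    have hstep : pvStep (some a) x = some (min a x) := by
      show (if x < a then some x else some a) = some (min a x)
      rcases lt_or_ge x a with h | h
      · rw [if_pos h, min_eq_right h.le]
      · rw [if_neg (not_lt.mpr h), min_eq_left h]
    rw [hstep, ih]

lemma foldl_upd_eq_foldl_min (l : List Nat) :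
    ∀ acc : Int, 0 < acc →
      l.foldl pvUpd acc = (l.filterMap pvDig).foldl min acc := by
  induction l with
  | nil => intro acc _; rfl
  | cons d l ih =>
    intro acc hpos
    rcases Nat.eq_zero_or_pos d with hd | hd
    · subst hd
      simp only [List.foldl_cons, List.filterMap_cons, pvDig]
      have : pvUpd acc 0 = acc := by unfold pvUpd; simp
      rw [this]
      exact ih acc hpos
    · have hdi : (0:Int) < (d:Int) := by exact_mod_cast hd
      simp only [List.foldl_cons, List.filterMap_cons, pvDig,
        if_neg (Nat.pos_iff_ne_zero.mp hd)]
      have : pvUpd acc d = min acc (d : Int) := by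
        unfold pvUpd
        rcases lt_or_ge ((d:Int)) acc with h | h
        · rw [if_pos ⟨by omega, h⟩, min_eq_right h.le]
        · rw [if_neg (by omega), min_eq_left h]
      rw [this]
      exact ih (min acc d) (by omega)

lemma dig_char (d : Nat) (hd : d < 10) :
    (if Nat.digitChar d ≠ '0' then some (((Nat.digitChar d).toNat : Int) - 48) else none)
      = pvDig d := by
  interval_cases d <;> decide

lemma filterMap_digitChar (l : List Nat) (h : ∀ d ∈ l, d < 10) :
    (l.map Nat.digitChar).filterMap
        (fun c => if c ≠ '0' then some ((c.toNat : Int) - 48) else none)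
      = l.filterMap pvDig := by
  rw [List.filterMap_map]
  exact List.filterMap_congr (fun d hd => dig_char d (h d hd))

lemma min_rightComm : ∀ (a b c : Int), min (min a b) c = min (min a c) b := by
  intro a b c; rw [min_right_comm]

lemma foldl_min_reverse (xs : List Int) (a : Int) :
    xs.reverse.foldl min a = xs.foldl min a :=
  haveI : RightCommutative (fun (x y : Int) => min x y) := ⟨min_rightComm⟩
  (List.reverse_perm xs).foldl_eq a

lemma mem_filterMap_pvDig_bounds (l : List Nat) (h : ∀ d ∈ l, d < 10)
    (x : Int) (hx : x ∈ l.filterMap pvDig) : 1 ≤ x ∧ x ≤ 9 := by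
  rcases List.mem_filterMap.mp hx with ⟨d, hd, hdx⟩
  unfold pvDig at hdx
  by_cases h0 : d = 0
  · rw [if_pos h0] at hdx
    exact absurd hdx (by simp)
  · rw [if_neg h0] at hdx
    obtain rfl := Option.some_inj.mp hdx
    have := h d hd
    omega

-- fold of `min` from 9 vs Python's min-with-default, for lists of values ≤ 9
lemma fold_vs_min? (l : List Int) (hb : ∀ x ∈ l, x ≤ 9) :
    l.foldl min 9 =
      (match PySem.List.min? l id with | some v => v | none => (9 : Int)) := by
  cases l with
  | nil => rfl
  | cons x xs =>
    rw [min?_eq_foldl_pvStep, List.foldl_cons, List.foldl_cons]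
    have h1 : pvStep none x = some x := rfl
    rw [h1, min?_foldl]
    have hx9 : x ≤ 9 := hb x List.mem_cons_self
    rw [min_eq_right hx9]

-- main bridge: for m > 0, A's loop from 9 equals B's min-with-default over str(m)'s nonzero digits
lemma main_pos (m : Nat) (hm : 0 < m) :
    (Nat.digits 10 m).foldl pvUpd 9 =
      (match PySem.List.min?
          ((Nat.toDigits 10 m).filterMap
            (fun c => if c ≠ '0' then some ((c.toNat : Int) - 48) else none)) id with
        | some v => v
        | none => (9 : Int)) := by
  have hlt : ∀ d ∈ Nat.digits 10 m, d < 10 := fun d hd => Nat.digits_lt_base (by norm_num) hd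
  rw [Nat.toDigits, toDigitsCore_eq (m + 1) m [] hm (by omega), List.append_nil,
      List.filterMap_reverse, filterMap_digitChar _ hlt,
      foldl_upd_eq_foldl_min _ 9 (by norm_num),
      ← foldl_min_reverse ((Nat.digits 10 m).filterMap pvDig) 9]
  exact fold_vs_min? _ (fun x hx =>
    (mem_filterMap_pvDig_bounds _ hlt x (List.mem_reverse.mp hx)).2)

-- ===== VERDICT (by name: the statement is the Claim_ definition above) =====
theorem minNonZeroDigit_spec : Claim_equal_minNonZeroDigit := by
  intro n _
  unfold Spec_minNonZeroDigit minNonZeroDigit minNonZeroDigit_alt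
  by_cases hn : n ≤ 0
  · rw [if_pos hn, minNonZeroDigitLoop, if_neg (by omega)]
  · rw [if_neg hn]
    have hcast : n = ((n.toNat : Nat) : Int) := by omega
    rw [hcast, loop_eq_foldl_digits n.toNat 9, main_pos n.toNat (by omega)]
    have hchars : (PySem.Int.toStr ((n.toNat : Nat) : Int)).toList = Nat.toDigits 10 n.toNat := by
      rw [PySem.Int.toList_toStr]
      have hneg : ¬ (((n.toNat : Nat) : Int) < 0) := by omega
      unfold PySem.Int.toChars
      rw [if_neg hneg, Int.toNat_natCast]
    rw [hchars]
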